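-- pv_equiv track=rewrite | github.com/Lily-Sakellaridi/Custom-Implementations-of-Bioinformatics-Algorithms | graphs.py | find_all_nodes
-- ===== SOURCE A (Python) =====
-- def find_all_nodes(graph):
--     """
--     Return all nodes in a graph.
--
--     graph: directed dictionary
--     keys: nodes; strings or integers
--     values: neighbor nodes; lists of strings or lists of integers
--     """
--     nodes = []
--
--     for node, neighbors in graph.items():
--         if node not in nodes:
--             nodes.append(node)
--         for neighbor in neighbors:
--             if neighbor not in nodes:
--                 nodes.append(neighbor)
--
--     return nodes
-- ===== SOURCE B (Python) =====
-- def find_all_nodes(graph):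
--     """Return all nodes (keys and neighbors) in first-appearance order.
--
--     Head-then-filter dedup: repeatedly emit the first remaining element and
--     strip all its occurrences from the rest; no seen-accumulator is kept.
--     """
--     flat = [x for node, neighbors in graph.items() for x in (node, *neighbors)]
--     out = []
--     while flat:
--         x = flat[0]
--         out.append(x)
--         flat = [y for y in flat if y != x]
--     return out
-- ===== Notes on version B (the rewrite author's own statement) =====
-- stated objective: alternative
-- what changed: A keeps a growing accumulator and membership-tests every node/neighbor against it inside nested loops; B first flattens the graph and then deduplicates by a head-then-filter loop that emits the first remaining element and strips all its occurrences from the remainder, maintaining no seen-collection at all.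
import Mathlib
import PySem

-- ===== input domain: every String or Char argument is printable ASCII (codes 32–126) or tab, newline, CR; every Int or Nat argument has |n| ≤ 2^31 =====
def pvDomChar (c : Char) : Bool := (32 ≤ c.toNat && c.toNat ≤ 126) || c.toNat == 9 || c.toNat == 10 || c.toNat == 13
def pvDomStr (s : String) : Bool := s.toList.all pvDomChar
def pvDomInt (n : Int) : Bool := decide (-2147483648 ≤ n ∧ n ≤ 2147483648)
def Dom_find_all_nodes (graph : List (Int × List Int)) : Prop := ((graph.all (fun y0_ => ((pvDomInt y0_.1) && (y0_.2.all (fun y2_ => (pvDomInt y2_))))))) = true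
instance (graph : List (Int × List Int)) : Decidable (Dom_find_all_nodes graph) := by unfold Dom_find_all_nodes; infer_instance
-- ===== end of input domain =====

-- B replaces A's seen-accumulator membership scans by flatten + head-then-filter dedup (alternative decomposition, same cost).

-- ===== PORT A =====
-- Literal port of A: accumulator list, append node if absent, then each neighbor if absent.
def find_all_nodes (graph : List (Int × List Int)) : List Int :=
  graph.foldl (fun nodes p =>
    let nodes := if nodes.contains p.1 then nodes else nodes ++ [p.1]
    p.2.foldl (fun ns neighbor => if ns.contains neighbor then ns else ns ++ [neighbor]) nodes) []

-- ===== PORT B =====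
-- while flat: x = flat[0]; out.append(x); flat = [y for y in flat if y != x]
def dedupHead : List Int → List Int
  | [] => []
  | x :: rest => x :: dedupHead ((x :: rest).filter (fun y => y ≠ x))
termination_by l => l.length
decreasing_by
  simp only [List.filter_cons, List.length_cons]
  rw [if_neg (by simp)]
  exact Nat.lt_succ_of_le (List.length_filter_le _ _)

-- Port of B: flatten (node then neighbors), then head-then-filter dedup.
def find_all_nodes_alt (graph : List (Int × List Int)) : List Int :=
  dedupHead (graph.flatMap (fun p => p.1 :: p.2))

-- ===== PRECONDITION & SPEC =====
def Spec_find_all_nodes (graph : List (Int × List Int)) (out : List Int) : Prop := out = find_all_nodes_alt graph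
instance (graph : List (Int × List Int)) (out : List Int) : Decidable (Spec_find_all_nodes graph out) := by unfold Spec_find_all_nodes; infer_instance

-- ===== CLAIM (what is proved, stated in full; the proofs are below) =====
def Claim_equal_find_all_nodes : Prop := ∀ (graph : List (Int × List Int)), Dom_find_all_nodes graph → Spec_find_all_nodes graph (find_all_nodes graph)

-- ===== LEMMAS AND PROOFS =====

-- A's nested fold is a single Set.add fold over the flattened node stream.
theorem fold_add_flatMap (graph : List (Int × List Int)) (acc : List Int) :
    graph.foldl (fun nodes p =>
      let nodes := if nodes.contains p.1 then nodes else nodes ++ [p.1]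
      p.2.foldl (fun ns neighbor => if ns.contains neighbor then ns else ns ++ [neighbor]) nodes) acc
    = (graph.flatMap (fun p => p.1 :: p.2)).foldl PySem.Set.add acc := by
  induction graph generalizing acc with
  | nil => rfl
  | cons hd tl ih =>
      simp only [List.foldl_cons, List.flatMap_cons, List.foldl_append, ih]
      rfl

theorem dedupHead_nil : dedupHead [] = [] := by
  rw [dedupHead.eq_def]

theorem dedupHead_cons (x : Int) (rest : List Int) :
    dedupHead (x :: rest) = x :: dedupHead (rest.filter (fun y => y ≠ x)) := by
  rw [dedupHead.eq_def]
  simp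

-- The accumulator fold equals acc followed by head-filter dedup of the not-yet-seen elements.
theorem foldl_add_eq_dedupHead (l : List Int) : ∀ acc : List Int,
    l.foldl PySem.Set.add acc = acc ++ dedupHead (l.filter (fun y => !acc.contains y)) := by
  induction l with
  | nil => intro acc; simp [dedupHead_nil]
  | cons x tl ih =>
      intro acc
      rw [List.filter_cons]
      by_cases hx : x ∈ acc
      · have hadd : PySem.Set.add acc x = acc := by
          simp [PySem.Set.add, PySem.Set.contains, hx]
        rw [List.foldl_cons, hadd, ih, if_neg (by simp [hx])]
      · have hadd : PySem.Set.add acc x = acc ++ [x] := by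
          simp [PySem.Set.add, PySem.Set.contains, hx]
        have hfil : (tl.filter (fun y => !acc.contains y)).filter (fun y => y ≠ x)
            = tl.filter (fun y => !(acc ++ [x]).contains y) := by
          rw [List.filter_filter]
          apply List.filter_congr
          intro y _
          simp only [List.contains_eq_mem, decide_not]
          by_cases h1 : y ∈ acc <;> by_cases h2 : y = x <;> simp [h1, h2]
        rw [List.foldl_cons, hadd, ih, if_pos (by simp [hx]), dedupHead_cons, hfil]
        simp

-- ===== VERDICT (by name: the statement is the Claim_ definition above) =====
theorem find_all_nodes_spec : Claim_equal_find_all_nodes := by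
  intro graph _
  unfold Spec_find_all_nodes find_all_nodes find_all_nodes_alt
  rw [fold_add_flatMap, foldl_add_eq_dedupHead]
  simp
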